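-- pv_equiv track=rewrite | github.com/sdsdsdsdaf/Code | 충돌위험.py | findShortestPathBetweenTwoPoints
-- ===== SOURCE A (Python) =====
-- ROW = 0
--
-- COL = 1
--
-- def findShortestPathBetweenTwoPoints(points_start, points_end): #이 경우에는 장애물이 없으므로 bfs 대신 맨해튼 거리(그리드)를 이용할 수 있다.
--
--     route = []
--     move_row = points_end[ROW] - points_start[ROW]
--     move_col = points_end[COL] - points_start[COL]
--
--     new_row = points_start[ROW]
--     new_col = points_start[COL]
--
--     for i in range(1, abs(move_row)+1): #R좌표 먼저 움직임
--
--         new_row = points_start[ROW] +  i * ( 1 if move_row >=0  else -1)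
--         route.append([new_row, new_col])
--
--
--     for i in range(1, abs(move_col)+1):
--
--         new_col = points_start[COL] + i * (1 if move_col >= 0 else -1)
--         route.append([new_row, new_col])
--
--     return route
-- ===== SOURCE B (Python) =====
-- def findShortestPathBetweenTwoPoints(points_start, points_end):
--     sr, sc = points_start[0], points_start[1]
--     dr = points_end[0] - sr
--     dc = points_end[1] - sc
--     ar = abs(dr)
--     row_sign = 1 if dr >= 0 else -1
--     col_sign = 1 if dc >= 0 else -1
--     return [[sr + row_sign * min(i, ar), sc + col_sign * max(0, i - ar)]
--             for i in range(1, ar + abs(dc) + 1)]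
-- ===== Notes on version B (the rewrite author's own statement) =====
-- stated objective: alternative
-- what changed: B replaces A's two stateful phase loops (rows appended first, then columns, each maintaining a current coordinate) by a stateless comprehension that maps each step index i directly to its cell via the closed-form min/max formula [sr + row_sign*min(i,|dr|), sc + col_sign*max(0, i-|dr|)].
import Mathlib
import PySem

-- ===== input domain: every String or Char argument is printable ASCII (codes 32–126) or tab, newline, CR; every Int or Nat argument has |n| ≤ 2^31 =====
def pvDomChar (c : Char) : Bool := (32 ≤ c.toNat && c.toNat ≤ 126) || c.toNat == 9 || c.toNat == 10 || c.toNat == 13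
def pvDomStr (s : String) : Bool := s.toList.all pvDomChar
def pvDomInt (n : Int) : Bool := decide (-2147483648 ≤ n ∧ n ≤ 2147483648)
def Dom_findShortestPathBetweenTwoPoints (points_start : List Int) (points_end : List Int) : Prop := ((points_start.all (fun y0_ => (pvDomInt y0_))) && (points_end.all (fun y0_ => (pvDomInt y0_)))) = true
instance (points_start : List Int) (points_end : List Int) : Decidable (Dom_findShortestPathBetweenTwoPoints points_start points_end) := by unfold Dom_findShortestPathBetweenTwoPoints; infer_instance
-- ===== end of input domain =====

-- B replaces A's two stateful phase loops by a stateless closed-form map: each step index i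
-- is sent directly to its cell by an arithmetic min/max formula (alternative decomposition).


-- ===== PORT A =====
-- A's first loop: for i in range(1, |move_row|+1): new_row := sr + i*sgn; route.append([new_row, new_col]).
-- Fuel k = remaining iterations, i the Python loop counter; state = (route, new_row).
def pvALoopRow (sr sc sgn : Int) : Nat → Int → List (List Int) → Int → (List (List Int)) × Int
  | 0, _, route, nr => (route, nr)
  | k+1, i, route, _ =>
      let nr := sr + i * sgn
      pvALoopRow sr sc sgn k (i+1) (route ++ [[nr, sc]]) nr

-- A's second loop: for i in range(1, |move_col|+1): new_col := sc + i*sgn; route.append([new_row, new_col]).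
def pvALoopCol (sc nr sgn : Int) : Nat → Int → List (List Int) → List (List Int)
  | 0, _, route => route
  | k+1, i, route => pvALoopCol sc nr sgn k (i+1) (route ++ [[nr, sc + i * sgn]])

def findShortestPathBetweenTwoPoints (points_start : List Int) (points_end : List Int) : List (List Int) :=
  let sr := ((PySem.List.pyGet? points_start 0).getD 0)   -- IndexError (len < 2) excluded by Pre_
  let sc := ((PySem.List.pyGet? points_start 1).getD 0)
  let er := ((PySem.List.pyGet? points_end 0).getD 0)
  let ec := ((PySem.List.pyGet? points_end 1).getD 0)
  let move_row := er - sr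
  let move_col := ec - sc
  let st := pvALoopRow sr sc (if move_row ≥ 0 then 1 else -1) move_row.natAbs 1 [] sr
  pvALoopCol sc st.2 (if move_col ≥ 0 then 1 else -1) move_col.natAbs 1 st.1

-- ===== PORT B =====
-- B is a stateless comprehension: [[sr + gr*min(i,ar), sc + gc*max(0,i-ar)] for i in range(1, ar+|dc|+1)].
def findShortestPathBetweenTwoPoints_alt (points_start : List Int) (points_end : List Int) : List (List Int) :=
  let sr := ((PySem.List.pyGet? points_start 0).getD 0)
  let sc := ((PySem.List.pyGet? points_start 1).getD 0)
  let dr := ((PySem.List.pyGet? points_end 0).getD 0) - sr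
  let dc := ((PySem.List.pyGet? points_end 1).getD 0) - sc
  let ar : Int := |dr|
  let gr : Int := if dr ≥ 0 then 1 else -1
  let gc : Int := if dc ≥ 0 then 1 else -1
  (PySem.List.pyRange 1 (ar + |dc| + 1) 1).map
    (fun i => [sr + gr * min i ar, sc + gc * max 0 (i - ar)])

-- ===== PRECONDITION & SPEC =====
-- Pre_ excludes exactly the inputs where Python A raises IndexError (a point list shorter than 2).
def Pre_findShortestPathBetweenTwoPoints (points_start : List Int) (points_end : List Int) : Prop :=
  2 ≤ points_start.length ∧ 2 ≤ points_end.length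
instance (points_start : List Int) (points_end : List Int) : Decidable (Pre_findShortestPathBetweenTwoPoints points_start points_end) := by unfold Pre_findShortestPathBetweenTwoPoints; infer_instance
def pvWitness_findShortestPathBetweenTwoPoints : List Int × List Int := ([0, 0], [2, -1])
def Spec_findShortestPathBetweenTwoPoints (points_start : List Int) (points_end : List Int) (out : List (List Int)) : Prop := out = findShortestPathBetweenTwoPoints_alt points_start points_end
instance (points_start : List Int) (points_end : List Int) (out : List (List Int)) : Decidable (Spec_findShortestPathBetweenTwoPoints points_start points_end out) := by unfold Spec_findShortestPathBetweenTwoPoints; infer_instance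

-- ===== CLAIM (what is proved, stated in full; the proofs are below) =====
def Claim_equal_findShortestPathBetweenTwoPoints : Prop := ∀ (points_start : List Int) (points_end : List Int), Dom_findShortestPathBetweenTwoPoints points_start points_end → Pre_findShortestPathBetweenTwoPoints points_start points_end → Spec_findShortestPathBetweenTwoPoints points_start points_end (findShortestPathBetweenTwoPoints points_start points_end)

-- ===== LEMMAS AND PROOFS =====

-- Closed-form cell lists (proof-only helpers).
def pvRowCells (sr sc sgn : Int) : Nat → Int → List (List Int)
  | 0, _ => []
  | k+1, i => [sr + i * sgn, sc] :: pvRowCells sr sc sgn k (i+1)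

def pvColCells (sc nr sgn : Int) : Nat → Int → List (List Int)
  | 0, _ => []
  | k+1, i => [nr, sc + i * sgn] :: pvColCells sc nr sgn k (i+1)

theorem pvALoopRow_eq (sr sc sgn : Int) :
    ∀ (k : Nat) (i : Int) (route : List (List Int)) (nr : Int),
      pvALoopRow sr sc sgn k i route nr =
        (route ++ pvRowCells sr sc sgn k i,
         if k = 0 then nr else sr + (i + (k : Int) - 1) * sgn) := by
  intro k
  induction k with
  | zero => intro i route nr; simp [pvALoopRow, pvRowCells]
  | succ k ih =>
      intro i route nr
      simp only [pvALoopRow, ih, pvRowCells, Nat.succ_ne_zero, if_false,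
        List.append_assoc, List.singleton_append, Prod.mk.injEq, true_and]
      cases k with
      | zero => simp
      | succ k =>
          simp only [Nat.succ_ne_zero, if_false]
          push_cast
          ring

theorem pvALoopCol_eq (sc nr sgn : Int) :
    ∀ (k : Nat) (i : Int) (route : List (List Int)),
      pvALoopCol sc nr sgn k i route = route ++ pvColCells sc nr sgn k i := by
  intro k
  induction k with
  | zero => intro i route; simp [pvALoopCol, pvColCells]
  | succ k ih =>
      intro i route
      simp only [pvALoopCol, ih, pvColCells, List.append_assoc, List.singleton_append]

-- B's formula on the row segment 1 ≤ i, i+k ≤ ar+1 reduces to A's row cells.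
theorem pvMapRow (sr sc gr gc ar : Int) :
    ∀ (k : Nat) (i : Int), 1 ≤ i → i + (k : Int) ≤ ar + 1 →
      ((PySem.List.pyRange i (i + (k : Int)) 1).map
        (fun j => ([sr + gr * min j ar, sc + gc * max 0 (j - ar)] : List Int)))
        = pvRowCells sr sc gr k i := by
  intro k
  induction k with
  | zero =>
      intro i _ _
      rw [PySem.List.pyRange_one_eq_nil (by omega)]
      rfl
  | succ k ih =>
      intro i h1 h2
      rw [PySem.List.pyRange_one_cons (by push_cast; omega)]
      have hb : i + ((k + 1 : Nat) : Int) = (i + 1) + (k : Int) := by push_cast; ring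
      rw [hb, List.map_cons, ih (i + 1) (by omega) (by push_cast at h2 ⊢; omega)]
      have hmin : min i ar = i := min_eq_left (by push_cast at h2; omega)
      have hmax : max 0 (i - ar) = 0 := max_eq_left (by push_cast at h2; omega)
      simp only [pvRowCells, hmin, hmax, mul_zero, add_zero, List.cons.injEq, and_true]
      ring

-- B's formula on the column segment ar+1 ≤ i reduces to A's column cells.
theorem pvMapCol (sr sc gr gc ar : Int) :
    ∀ (k : Nat) (i : Int), ar + 1 ≤ i →
      ((PySem.List.pyRange i (i + (k : Int)) 1).map
        (fun j => ([sr + gr * min j ar, sc + gc * max 0 (j - ar)] : List Int)))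
        = pvColCells sc (sr + gr * ar) gc k (i - ar) := by
  intro k
  induction k with
  | zero =>
      intro i _
      rw [PySem.List.pyRange_one_eq_nil (by omega)]
      rfl
  | succ k ih =>
      intro i h1
      rw [PySem.List.pyRange_one_cons (by push_cast; omega)]
      have hb : i + ((k + 1 : Nat) : Int) = (i + 1) + (k : Int) := by push_cast; ring
      rw [hb, List.map_cons, ih (i + 1) (by omega)]
      have hmin : min i ar = ar := min_eq_right (by omega)
      have hmax : max 0 (i - ar) = i - ar := max_eq_right (by omega)
      have hsh : (i + 1) - ar = (i - ar) + 1 := by ring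
      simp only [pvColCells, hmin, hmax, hsh, mul_comm gc (i - ar)]

-- ===== VERDICT (by name: the statement is the Claim_ definition above) =====
theorem findShortestPathBetweenTwoPoints_spec : Claim_equal_findShortestPathBetweenTwoPoints := by
  intro ps pe _ _
  unfold Spec_findShortestPathBetweenTwoPoints
  show findShortestPathBetweenTwoPoints ps pe = findShortestPathBetweenTwoPoints_alt ps pe
  simp only [findShortestPathBetweenTwoPoints, findShortestPathBetweenTwoPoints_alt]
  set sr := ((PySem.List.pyGet? ps 0).getD 0) with hsr
  set sc := ((PySem.List.pyGet? ps 1).getD 0) with hsc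
  set er := ((PySem.List.pyGet? pe 0).getD 0) with her
  set ec := ((PySem.List.pyGet? pe 1).getD 0) with hec
  clear_value sr sc er ec
  rw [pvALoopRow_eq, pvALoopCol_eq]
  set dr := er - sr with hdr
  set dc := ec - sc with hdc
  set gr : Int := if dr ≥ 0 then 1 else -1 with hgr
  set gc : Int := if dc ≥ 0 then 1 else -1 with hgc
  set A : Nat := dr.natAbs with hA
  set C : Nat := dc.natAbs with hC
  have habsr : |dr| = (A : Int) := Int.abs_eq_natAbs dr
  have habsc : |dc| = (C : Int) := Int.abs_eq_natAbs dc
  rw [habsr, habsc]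
  have hsplit : PySem.List.pyRange 1 ((A : Int) + (C : Int) + 1) 1
      = PySem.List.pyRange 1 (1 + (A : Int)) 1 ++ PySem.List.pyRange (1 + (A : Int)) ((1 + (A : Int)) + (C : Int)) 1 := by
    have := PySem.List.pyRange_one_append 1 (1 + (A : Int)) ((1 + (A : Int)) + (C : Int)) (by omega) (by omega)
    rw [show (A : Int) + (C : Int) + 1 = (1 + (A : Int)) + (C : Int) by ring]
    exact this
  rw [hsplit, List.map_append,
      show (1 : Int) + (A : Int) = 1 + ((A : Nat) : Int) from rfl]
  rw [show PySem.List.pyRange 1 (1 + (A : Int)) 1 = PySem.List.pyRange 1 (1 + (A : Int)) 1 from rfl]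
  rw [pvMapRow sr sc gr gc (A : Int) A 1 (by omega) (by omega)]
  rw [pvMapCol sr sc gr gc (A : Int) C (1 + (A : Int)) (by omega)]
  have hnr : (if A = 0 then sr else sr + (1 + (A : Int) - 1) * gr) = sr + gr * (A : Int) := by
    split_ifs with h
    · simp [h]
    · ring
  rw [hnr, show (1 + (A : Int)) - (A : Int) = 1 by ring]
  simp
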